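-- pv_equiv track=rewrite | github.com/PizzaTimeJoshua/ControllerMacroRunner | py_scripts/gen3_frame_finder.py | lcrng_advance
-- ===== SOURCE A (Python) =====
-- MULT = 0x41C64E6D
--
-- ADD = 0x6073
--
-- MASK = 0xFFFFFFFF
--
-- def lcrng_advance(seed, n):
--     """Advance LCRNG by n steps using fast exponentiation"""
--     if n < 0:
--         raise ValueError("n must be >= 0")
--
--     mul = MULT
--     add = ADD
--     acc_mul = 1
--     acc_add = 0
--
--     while n:
--         if n & 1:
--             acc_mul = (acc_mul * mul) & MASK
--             acc_add = (acc_add * mul + add) & MASK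
--         add = (add * ((mul + 1) & MASK)) & MASK
--         mul = (mul * mul) & MASK
--         n >>= 1
--
--     return (acc_mul * seed + acc_add) & MASK
-- ===== SOURCE B (Python) =====
-- MULT = 0x41C64E6D
--
-- ADD = 0x6073
--
-- MASK = 0xFFFFFFFF
--
-- def lcrng_advance(seed, n):
--     """Advance LCRNG by n steps: top-down divide-and-conquer affine squaring."""
--     if n < 0:
--         raise ValueError("n must be >= 0")
--
--     def power(k):
--         """Affine pair (mul, add) of the k-step advance."""
--         if k == 0:
--             return (1, 0)
--         hm, ha = power(k >> 1)
--         m = (hm * hm) & MASK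
--         a = (hm * ha + ha) & MASK
--         if k & 1:
--             m = (m * MULT) & MASK
--             a = (a * MULT + ADD) & MASK
--         return (m, a)
--
--     mul, add = power(n)
--     return (mul * seed + add) & MASK
-- ===== Notes on version B (the rewrite author's own statement) =====
-- stated objective: alternative
-- what changed: Replaces the low-to-high bit accumulation loop (iteratively squaring the base affine map and folding set bits into an accumulator) with a top-down recursive power(k) that squares the composed k//2-step affine pair and applies one extra base step when k is odd.
-- outside the precondition, e.g. on lcrng_advance(123, -1): A raises ValueError, B raises ValueError
import Mathlib
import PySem

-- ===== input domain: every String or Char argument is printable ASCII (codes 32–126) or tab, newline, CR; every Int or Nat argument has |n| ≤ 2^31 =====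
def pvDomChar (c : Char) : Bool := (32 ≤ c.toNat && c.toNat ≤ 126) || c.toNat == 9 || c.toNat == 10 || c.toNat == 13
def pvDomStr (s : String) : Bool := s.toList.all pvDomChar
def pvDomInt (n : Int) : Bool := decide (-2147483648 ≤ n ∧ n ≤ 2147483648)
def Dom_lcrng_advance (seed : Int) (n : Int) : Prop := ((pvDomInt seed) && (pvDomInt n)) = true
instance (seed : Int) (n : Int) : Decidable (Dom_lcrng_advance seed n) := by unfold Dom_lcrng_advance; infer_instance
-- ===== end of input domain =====

-- B replaces A's low-to-high bit-accumulation loop by a top-down recursive squaring of the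
-- composed affine pair (alternative decomposition, same asymptotic cost).
-- Python's `x & 0xFFFFFFFF` is ported as `x % 4294967296` (exact for every int, incl. negatives).

-- ===== PORT A =====
-- the while loop of A; state (mul, add, acc_mul, acc_add), n halves each round
def lcrngLoopA (mul add accm acca : Int) (n : Nat) : Int × Int :=
  if n = 0 then (accm, acca)
  else if n % 2 = 1 then
    lcrngLoopA ((mul * mul) % 4294967296) ((add * ((mul + 1) % 4294967296)) % 4294967296)
      ((accm * mul) % 4294967296) ((acca * mul + add) % 4294967296) (n / 2)
  else
    lcrngLoopA ((mul * mul) % 4294967296) ((add * ((mul + 1) % 4294967296)) % 4294967296)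
      accm acca (n / 2)

def lcrng_advance (seed : Int) (n : Int) : Int :=
  if n < 0 then 0  -- Python raises ValueError here; excluded by Pre_lcrng_advance
  else
    let p := lcrngLoopA 1103515245 24691 1 0 n.toNat
    (p.1 * seed + p.2) % 4294967296

-- ===== PORT B =====
-- power(k): affine pair (mul, add) of the k-step advance, by halving recursion
def lcrngPowB (k : Nat) : Int × Int :=
  if k = 0 then (1, 0)
  else
    let hp := lcrngPowB (k / 2)
    let m := (hp.1 * hp.1) % 4294967296
    let a := (hp.1 * hp.2 + hp.2) % 4294967296
    if k % 2 = 1 then ((m * 1103515245) % 4294967296, (a * 1103515245 + 24691) % 4294967296)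
    else (m, a)

def lcrng_advance_alt (seed : Int) (n : Int) : Int :=
  if n < 0 then 0  -- Python raises ValueError here; excluded by Pre_lcrng_advance
  else
    let p := lcrngPowB n.toNat
    (p.1 * seed + p.2) % 4294967296

-- ===== PRECONDITION & SPEC =====
-- A (and B) raise ValueError for n < 0; Pre_ excludes exactly those inputs.
def Pre_lcrng_advance (seed : Int) (n : Int) : Prop := 0 ≤ n
instance (seed : Int) (n : Int) : Decidable (Pre_lcrng_advance seed n) := by unfold Pre_lcrng_advance; infer_instance
def pvWitness_lcrng_advance : Int × Int := (305419896, 37)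

def Spec_lcrng_advance (seed : Int) (n : Int) (out : Int) : Prop := out = lcrng_advance_alt seed n
instance (seed : Int) (n : Int) (out : Int) : Decidable (Spec_lcrng_advance seed n out) := by unfold Spec_lcrng_advance; infer_instance

-- ===== CLAIM (what is proved, stated in full; the proofs are below) =====
def Claim_equal_lcrng_advance : Prop := ∀ (seed : Int) (n : Int), Dom_lcrng_advance seed n → Pre_lcrng_advance seed n → Spec_lcrng_advance seed n (lcrng_advance seed n)

-- ===== LEMMAS AND PROOFS =====

-- the affine map x ↦ (m*x + a) mod 2^32
def pvAff (m a x : Int) : Int := (m * x + a) % 4294967296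

-- n-fold application of the affine map (m, a)
def pvIter (m a : Int) : Nat → Int → Int
  | 0, x => x
  | Nat.succ k, x => pvAff m a (pvIter m a k x)

lemma pv_zmod (u v : Int) (h : (u : ZMod 4294967296) = (v : ZMod 4294967296)) :
    u % 4294967296 = v % 4294967296 := by
  have := (ZMod.intCast_eq_intCast_iff' (a := u) (b := v) (c := 4294967296)).mp h
  simpa using this

lemma pv_castmod (a : Int) : ((a % 4294967296 : Int) : ZMod 4294967296) = (a : ZMod 4294967296) := by
  have h := ZMod.intCast_mod a 4294967296
  simpa using h

lemma pvAff_congr (m1 a1 m2 a2 x : Int)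
    (hm : (m1 : ZMod 4294967296) = (m2 : ZMod 4294967296))
    (ha : (a1 : ZMod 4294967296) = (a2 : ZMod 4294967296)) :
    pvAff m1 a1 x = pvAff m2 a2 x := by
  unfold pvAff
  apply pv_zmod
  push_cast [hm, ha]
  ring

lemma pvAff_comp (m1 a1 m2 a2 x : Int) :
    pvAff ((m1 * m2) % 4294967296) ((m1 * a2 + a1) % 4294967296) x
      = pvAff m1 a1 (pvAff m2 a2 x) := by
  unfold pvAff
  apply pv_zmod
  push_cast [pv_castmod]
  ring

lemma pvAff_reduced (m a x : Int) : pvAff m a x % 4294967296 = pvAff m a x := by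
  unfold pvAff
  exact Int.emod_emod_of_dvd _ dvd_rfl

lemma pvIter_add (m a : Int) (p q : Nat) (x : Int) :
    pvIter m a (p + q) x = pvIter m a p (pvIter m a q x) := by
  induction p with
  | zero => simp [pvIter]
  | succ k ih => simp [Nat.succ_add, pvIter, ih]

lemma pvIter_succ_inner (m a : Int) (k : Nat) (x : Int) :
    pvIter m a k (pvAff m a x) = pvIter m a (k + 1) x := by
  induction k with
  | zero => simp [pvIter]
  | succ j ih => simp [pvIter, ih]

-- one doubled step of the base equals two base steps
lemma pvIter_sq (m a : Int) (k : Nat) (x : Int) :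
    pvIter ((m * m) % 4294967296) ((a * ((m + 1) % 4294967296)) % 4294967296) k x
      = pvIter m a (2 * k) x := by
  induction k generalizing x with
  | zero => simp [pvIter]
  | succ j ih =>
      show pvAff _ _ (pvIter _ _ j x) = _
      rw [ih]
      have h1 : pvAff ((m * m) % 4294967296) ((a * ((m + 1) % 4294967296)) % 4294967296)
          (pvIter m a (2 * j) x)
          = pvAff ((m * m) % 4294967296) ((m * a + a) % 4294967296) (pvIter m a (2 * j) x) := by
        apply pvAff_congr
        · rfl
        · push_cast [pv_castmod]
          ring
      rw [h1, pvAff_comp]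
      have : 2 * (j + 1) = 2 * j + 1 + 1 := by ring
      rw [this]
      simp [pvIter]

-- A's loop: result affine applied to x = n more base steps after the accumulator
lemma lcrngLoopA_spec (n : Nat) : ∀ (mul add accm acca x : Int),
    pvAff (lcrngLoopA mul add accm acca n).1 (lcrngLoopA mul add accm acca n).2 x
      = pvIter mul add n (pvAff accm acca x) := by
  induction n using Nat.strong_induction_on with
  | _ n ih =>
    intro mul add accm acca x
    by_cases h0 : n = 0
    · subst h0; simp [lcrngLoopA, pvIter]
    · rw [lcrngLoopA]
      simp only [h0, if_false]
      have hlt : n / 2 < n := Nat.div_lt_self (Nat.pos_of_ne_zero h0) (by omega)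
      by_cases hodd : n % 2 = 1
      · rw [if_pos hodd]
        rw [ih (n / 2) hlt]
        rw [pvIter_sq]
        have hacc : pvAff ((accm * mul) % 4294967296) ((acca * mul + add) % 4294967296) x
            = pvAff mul add (pvAff accm acca x) := by
          have : pvAff ((accm * mul) % 4294967296) ((acca * mul + add) % 4294967296) x
              = pvAff ((mul * accm) % 4294967296) ((mul * acca + add) % 4294967296) x := by
            apply pvAff_congr <;> (push_cast [pv_castmod]; ring)
          rw [this, pvAff_comp]
        rw [hacc, pvIter_succ_inner]
        have : 2 * (n / 2) + 1 = n := by omega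
        rw [this]
      · rw [if_neg hodd]
        rw [ih (n / 2) hlt]
        rw [pvIter_sq]
        have : 2 * (n / 2) = n := by omega
        rw [this]

-- B's recursion computes the n-step affine pair
lemma lcrngPowB_spec (k : Nat) : ∀ (x : Int),
    pvAff (lcrngPowB k).1 (lcrngPowB k).2 x = pvIter 1103515245 24691 k (x % 4294967296) := by
  induction k using Nat.strong_induction_on with
  | _ k ih =>
    intro x
    by_cases h0 : k = 0
    · subst h0
      simp [lcrngPowB, pvIter, pvAff]
    · rw [lcrngPowB]
      simp only [h0, if_false]
      have hlt : k / 2 < k := Nat.div_lt_self (Nat.pos_of_ne_zero h0) (by omega)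
      have hsq : ∀ y : Int,
          pvAff (((lcrngPowB (k / 2)).1 * (lcrngPowB (k / 2)).1) % 4294967296)
                (((lcrngPowB (k / 2)).1 * (lcrngPowB (k / 2)).2 + (lcrngPowB (k / 2)).2) % 4294967296) y
            = pvIter 1103515245 24691 (2 * (k / 2)) (y % 4294967296) := by
        intro y
        rw [pvAff_comp, ih (k / 2) hlt, pvAff_reduced, ih (k / 2) hlt, ← pvIter_add]
        congr 1
        omega
      by_cases hodd : k % 2 = 1
      · rw [if_pos hodd]
        have hc : pvAff (((((lcrngPowB (k / 2)).1 * (lcrngPowB (k / 2)).1) % 4294967296) * 1103515245) % 4294967296)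
            (((((lcrngPowB (k / 2)).1 * (lcrngPowB (k / 2)).2 + (lcrngPowB (k / 2)).2) % 4294967296) * 1103515245 + 24691) % 4294967296) x
            = pvAff ((1103515245 * (((lcrngPowB (k / 2)).1 * (lcrngPowB (k / 2)).1) % 4294967296)) % 4294967296)
            ((1103515245 * (((lcrngPowB (k / 2)).1 * (lcrngPowB (k / 2)).2 + (lcrngPowB (k / 2)).2) % 4294967296) + 24691) % 4294967296) x := by
          apply pvAff_congr <;> (push_cast [pv_castmod]; ring)
        rw [hc, pvAff_comp, hsq]
        have hk : k = 2 * (k / 2) + 1 := by omega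
        conv_rhs => rw [hk]
        rfl
      · rw [if_neg hodd]
        rw [hsq]
        congr 1
        omega

theorem lcrng_advance_spec : Claim_equal_lcrng_advance := by
  intro seed n _ hpre
  unfold Spec_lcrng_advance lcrng_advance lcrng_advance_alt
  have hneg : ¬ n < 0 := by exact not_lt.mpr hpre
  simp only [hneg, if_false]
  have hA := lcrngLoopA_spec n.toNat 1103515245 24691 1 0 seed
  have hB := lcrngPowB_spec n.toNat seed
  show pvAff (lcrngLoopA 1103515245 24691 1 0 n.toNat).1 (lcrngLoopA 1103515245 24691 1 0 n.toNat).2 seed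
      = pvAff (lcrngPowB n.toNat).1 (lcrngPowB n.toNat).2 seed
  rw [hA, hB]
  have h10 : pvAff 1 0 seed = seed % 4294967296 := by
    unfold pvAff; rw [one_mul, add_zero]
  rw [h10]
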